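-- pv_equiv track=rewrite | github.com/S-Christensen/cartographersStudy | backend/scoringCards.py | gnomishcolony
-- ===== SOURCE A (Python) =====
-- def dfs(grid, row, col, visited, terrain_type):
--     stack = [(row, col)]
--     cluster = []
--
--     while stack:
--         r, c = stack.pop()
--         if (r, c) not in visited and grid[r][c] == terrain_type:
--             visited.add((r, c))
--             cluster.append((r, c))
--             for dr, dc in [(1, 0), (-1, 0), (0, 1), (0, -1)]:
--                 nr, nc = r + dr, c + dc
--                 if 0 <= nr < len(grid) and 0 <= nc < len(grid[0]):
--                     stack.append((nr, nc))
--     return cluster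
--
-- def gnomishcolony(grid, terrain_type="Village"):
--     visited = set()
--     clusters = []
--
--     for row in range(len(grid)):
--         for col in range(len(grid[0])):
--             if (row, col) not in visited and grid[row][col] == terrain_type:
--                 cluster = dfs(grid, row, col, visited, terrain_type)
--                 clusters.append(cluster)
--
--     count_2x2 = 0
--     for cluster in clusters:
--         if any(
--                 (r, c) in cluster and
--                 (r + 1, c) in cluster and
--                 (r, c + 1) in cluster and
--                 (r + 1, c + 1) in cluster
--                 for r, c in cluster
--         ):
--             count_2x2 += 1
--
--     return count_2x2*6
-- ===== SOURCE B (Python) =====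
-- def gnomishcolony(grid, terrain_type="Village"):
--     H = len(grid)
--     W = len(grid[0]) if grid else 0
--
--     def terr(r, c):
--         return 0 <= r < H and 0 <= c < W and grid[r][c] == terrain_type
--
--     # top-left corners of 2x2 blocks of the terrain, in row-major order
--     corners = [(r, c) for r in range(H) for c in range(W)
--                if terr(r, c) and terr(r + 1, c) and terr(r, c + 1) and terr(r + 1, c + 1)]
--
--     seen = set()
--     count = 0
--     for seed in corners:
--         if seed in seen:
--             continue
--         # level-by-level flood fill of the whole cluster from this corner
--         comp = {seed}
--         frontier = [seed]
--         while frontier: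
--             nxt = []
--             for (r, c) in frontier:
--                 for nb in ((r + 1, c), (r - 1, c), (r, c + 1), (r, c - 1)):
--                     if terr(nb[0], nb[1]) and nb not in comp:
--                         comp.add(nb)
--                         nxt.append(nb)
--             frontier = nxt
--         seen |= comp
--         count += 1
--     return count * 6
-- ===== Notes on version B (the rewrite author's own statement) =====
-- stated objective: alternative
-- what changed: A flood-fills every terrain cell with a DFS stack, stores all clusters as lists and then rescans each cluster with an any-scan using list membership to find a 2x2 block; B first lists the 2x2 corner cells and then counts clusters by one level-order (frontier-by-frontier) flood fill per still-unseen corner with set membership, so clusters without a 2x2 block are never built and there is no second scanning phase.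
import Mathlib
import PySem

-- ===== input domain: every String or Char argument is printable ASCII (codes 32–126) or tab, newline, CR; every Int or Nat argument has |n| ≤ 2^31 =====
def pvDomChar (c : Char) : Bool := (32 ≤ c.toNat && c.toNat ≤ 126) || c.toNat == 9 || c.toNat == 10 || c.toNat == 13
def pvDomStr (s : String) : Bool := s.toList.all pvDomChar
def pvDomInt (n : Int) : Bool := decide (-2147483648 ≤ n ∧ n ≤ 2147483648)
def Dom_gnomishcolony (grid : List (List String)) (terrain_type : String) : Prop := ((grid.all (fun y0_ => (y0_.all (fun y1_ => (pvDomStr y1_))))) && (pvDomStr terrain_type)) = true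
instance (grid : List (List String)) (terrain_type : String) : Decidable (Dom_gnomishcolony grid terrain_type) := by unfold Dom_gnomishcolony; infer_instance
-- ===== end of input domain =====

-- B replaces A's two-phase algorithm (DFS flood fill over all cells building every cluster,
-- then an any-scan of each cluster list for a 2x2 block) by a level-order flood fill seeded
-- only at the 2x2 corner cells, counting still-unseen corners; return values agree (claim below).

-- ===== PORT A =====
-- grid[r][c] (indices are in range whenever A evaluates this under Pre_)
def pvCell (grid : List (List String)) (r c : Int) : String :=
  PySem.List.pyGetD (PySem.List.pyGetD grid r []) c ""

def pvDirs : List (Int × Int) := [(1, 0), (-1, 0), (0, 1), (0, -1)]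

-- the four bound-checked stack.append's of A's dfs (top of Python's stack = head here)
def pvPush (grid : List (List String)) (p : Int × Int) (st : List (Int × Int)) : List (Int × Int) :=
  pvDirs.foldl (fun acc d =>
    let nr := p.1 + d.1
    let nc := p.2 + d.2
    if 0 ≤ nr ∧ nr < (grid.length : Int) ∧ 0 ≤ nc ∧ nc < ((grid.headD []).length : Int) then
      (nr, nc) :: acc
    else acc) st

-- A's dfs while-loop (fuel only makes the loop total; it is large enough, see dfs lemmas below)
def pvDfsLoop (grid : List (List String)) (t : String) :
    Nat → List (Int × Int) → PySem.Set (Int × Int) → List (Int × Int) →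
    PySem.Set (Int × Int) × List (Int × Int)
  | 0, _, visited, cluster => (visited, cluster)
  | fuel + 1, stack, visited, cluster =>
    match stack with
    | [] => (visited, cluster)
    | p :: rest =>
      if PySem.Set.contains visited p = false ∧ pvCell grid p.1 p.2 = t then
        pvDfsLoop grid t fuel (pvPush grid p rest) (PySem.Set.add visited p) (cluster ++ [p])
      else
        pvDfsLoop grid t fuel rest visited cluster

def gnomishcolony (grid : List (List String)) (terrain_type : String) : Int :=
  let res := (PySem.List.pyRange 0 (grid.length : Int) 1).foldl (fun st row =>
    (PySem.List.pyRange 0 ((grid.headD []).length : Int) 1).foldl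
      (fun (st : PySem.Set (Int × Int) × List (List (Int × Int))) col =>
        if PySem.Set.contains st.1 (row, col) = false ∧ pvCell grid row col = terrain_type then
          let r := pvDfsLoop grid terrain_type (5 * (grid.length * (grid.headD []).length) + 1)
                     [(row, col)] st.1 []
          (r.1, st.2 ++ [r.2])
        else st) st)
    ((PySem.Set.empty : PySem.Set (Int × Int)), ([] : List (List (Int × Int))))
  let count : Int := res.2.foldl (fun acc cl =>
    if cl.any (fun rc => cl.contains rc && cl.contains (rc.1 + 1, rc.2) &&
        cl.contains (rc.1, rc.2 + 1) && cl.contains (rc.1 + 1, rc.2 + 1)) = true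
    then acc + 1 else acc) 0
  count * 6

-- ===== PORT B =====
-- Source B's terr(r, c)
def pvTerr (grid : List (List String)) (t : String) (r c : Int) : Bool :=
  decide (0 ≤ r ∧ r < (grid.length : Int) ∧ 0 ≤ c ∧ c < ((grid.headD []).length : Int) ∧
          pvCell grid r c = t)

def pvNbrs (p : Int × Int) : List (Int × Int) :=
  [(p.1 + 1, p.2), (p.1 - 1, p.2), (p.1, p.2 + 1), (p.1, p.2 - 1)]

-- one round of Source B's level flood fill: expand every frontier cell, collect the next level
def pvBfsRound (grid : List (List String)) (t : String)
    (comp : PySem.Set (Int × Int)) (frontier : List (Int × Int)) :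
    PySem.Set (Int × Int) × List (Int × Int) :=
  frontier.foldl (fun st p =>
    (pvNbrs p).foldl (fun (st : PySem.Set (Int × Int) × List (Int × Int)) nb =>
      if pvTerr grid t nb.1 nb.2 = true ∧ PySem.Set.contains st.1 nb = false then
        (PySem.Set.add st.1 nb, st.2 ++ [nb])
      else st) st) (comp, [])

-- Source B's while-frontier loop (fuel only makes the loop total; it is large enough, see bfs lemmas)
def pvBfsLoop (grid : List (List String)) (t : String) :
    Nat → PySem.Set (Int × Int) → List (Int × Int) → PySem.Set (Int × Int)
  | 0, comp, _ => comp
  | fuel + 1, comp, frontier =>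
    match frontier with
    | [] => comp
    | _ :: _ =>
      let st := pvBfsRound grid t comp frontier
      pvBfsLoop grid t fuel st.1 st.2

-- Source B's corners comprehension, in row-major order
def pvCorners (grid : List (List String)) (t : String) : List (Int × Int) :=
  (PySem.List.pyRange 0 (grid.length : Int) 1).flatMap (fun r =>
    ((PySem.List.pyRange 0 ((grid.headD []).length : Int) 1).filter (fun c =>
      pvTerr grid t r c && pvTerr grid t (r + 1) c &&
      pvTerr grid t r (c + 1) && pvTerr grid t (r + 1) (c + 1))).map (fun c => (r, c)))

def gnomishcolony_alt (grid : List (List String)) (terrain_type : String) : Int :=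
  let res := (pvCorners grid terrain_type).foldl
    (fun (st : PySem.Set (Int × Int) × Int) seed =>
      if PySem.Set.contains st.1 seed = true then st
      else
        let comp := pvBfsLoop grid terrain_type (grid.length * (grid.headD []).length + 2)
                      (PySem.Set.add PySem.Set.empty seed) [seed]
        (PySem.Set.union st.1 comp, st.2 + 1))
    ((PySem.Set.empty : PySem.Set (Int × Int)), (0 : Int))
  res.2 * 6

-- ===== PRECONDITION & SPEC =====
-- Pre_ excludes exactly the ragged grids on which A raises IndexError: A reads grid[row][col]
-- for every col < len(grid[0]), so it raises iff some row is shorter than the first row.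
def Pre_gnomishcolony (grid : List (List String)) (terrain_type : String) : Prop :=
  ∀ row ∈ grid, (grid.headD []).length ≤ row.length
instance (grid : List (List String)) (terrain_type : String) :
    Decidable (Pre_gnomishcolony grid terrain_type) := by unfold Pre_gnomishcolony; infer_instance

def pvWitness_gnomishcolony : List (List String) × String := ([[ "V", "V"], ["V", "V"]], "V")

def Spec_gnomishcolony (grid : List (List String)) (terrain_type : String) (out : Int) : Prop :=
  out = gnomishcolony_alt grid terrain_type
instance (grid : List (List String)) (terrain_type : String) (out : Int) :
    Decidable (Spec_gnomishcolony grid terrain_type out) := by unfold Spec_gnomishcolony; infer_instance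

-- ===== CLAIM (what is proved, stated in full; the proofs are below) =====
def Claim_equal_gnomishcolony : Prop := ∀ (grid : List (List String)) (terrain_type : String), Dom_gnomishcolony grid terrain_type → Pre_gnomishcolony grid terrain_type → Spec_gnomishcolony grid terrain_type (gnomishcolony grid terrain_type)

-- ===== LEMMAS AND PROOFS =====

-- ---- mathematical layer: terrain cells, adjacency, connectivity ----
def pvBnd (grid : List (List String)) (x : Int × Int) : Prop :=
  0 ≤ x.1 ∧ x.1 < (grid.length : Int) ∧ 0 ≤ x.2 ∧ x.2 < ((grid.headD []).length : Int)

def TerrP (grid : List (List String)) (t : String) (x : Int × Int) : Prop :=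
  pvBnd grid x ∧ pvCell grid x.1 x.2 = t

def AdjP (x y : Int × Int) : Prop :=
  (y.1 = x.1 + 1 ∧ y.2 = x.2) ∨ (y.1 = x.1 - 1 ∧ y.2 = x.2) ∨
  (y.1 = x.1 ∧ y.2 = x.2 + 1) ∨ (y.1 = x.1 ∧ y.2 = x.2 - 1)

def StP (grid : List (List String)) (t : String) (x y : Int × Int) : Prop :=
  TerrP grid t x ∧ TerrP grid t y ∧ AdjP x y

def ReachP (grid : List (List String)) (t : String) : Int × Int → Int × Int → Prop :=
  Relation.ReflTransGen (StP grid t)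

def CornerP (grid : List (List String)) (t : String) (c : Int × Int) : Prop :=
  TerrP grid t c ∧ TerrP grid t (c.1 + 1, c.2) ∧ TerrP grid t (c.1, c.2 + 1) ∧
  TerrP grid t (c.1 + 1, c.2 + 1)

def pvHW (grid : List (List String)) : Nat := grid.length * (grid.headD []).length

def pvCellsRM (grid : List (List String)) : List (Int × Int) :=
  (PySem.List.pyRange 0 (grid.length : Int) 1).flatMap (fun r =>
    (PySem.List.pyRange 0 ((grid.headD []).length : Int) 1).map (fun c => (r, c)))

-- the two fold bodies of the ports, named for the lemmas
def pvAStep (grid : List (List String)) (t : String)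
    (st : PySem.Set (Int × Int) × List (List (Int × Int))) (p : Int × Int) :
    PySem.Set (Int × Int) × List (List (Int × Int)) :=
  if PySem.Set.contains st.1 p = false ∧ pvCell grid p.1 p.2 = t then
    let r := pvDfsLoop grid t (5 * (grid.length * (grid.headD []).length) + 1) [p] st.1 []
    (r.1, st.2 ++ [r.2])
  else st

def pvBStep (grid : List (List String)) (t : String)
    (st : PySem.Set (Int × Int) × Int) (seed : Int × Int) : PySem.Set (Int × Int) × Int :=
  if PySem.Set.contains st.1 seed = true then st
  else
    let comp := pvBfsLoop grid t (grid.length * (grid.headD []).length + 2)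
                  (PySem.Set.add PySem.Set.empty seed) [seed]
    (PySem.Set.union st.1 comp, st.2 + 1)

def pvHasCorner (cl : List (Int × Int)) : Bool :=
  cl.any (fun rc => cl.contains rc && cl.contains (rc.1 + 1, rc.2) &&
    cl.contains (rc.1, rc.2 + 1) && cl.contains (rc.1 + 1, rc.2 + 1))

def pvHit (l cl : List (Int × Int)) : Bool := cl.any (fun x => l.contains x)

-- ---- small bridges ----
theorem pv_contains_false {α : Type} [BEq α] [LawfulBEq α] (s : PySem.Set α) (x : α) :
    PySem.Set.contains s x = false ↔ x ∉ s := by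
  rw [← Bool.not_eq_true, not_iff_not, PySem.Set.contains_iff]

theorem pv_contains_true {α : Type} [BEq α] [LawfulBEq α] (s : PySem.Set α) (x : α) :
    PySem.Set.contains s x = true ↔ x ∈ s := by
  exact PySem.Set.contains_iff s x

theorem pvTerr_iff (grid : List (List String)) (t : String) (x : Int × Int) :
    pvTerr grid t x.1 x.2 = true ↔ TerrP grid t x := by
  simp [pvTerr, TerrP, pvBnd, and_assoc]

theorem pv_mem_nbrs (u x : Int × Int) : x ∈ pvNbrs u ↔ AdjP u x := by
  simp [pvNbrs, AdjP, Prod.ext_iff]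

theorem pv_adj_symm {x y : Int × Int} (h : AdjP x y) : AdjP y x := by
  unfold AdjP at h ⊢; omega

theorem pv_st_symm (grid : List (List String)) (t : String) {x y : Int × Int}
    (h : StP grid t x y) : StP grid t y x := by
  exact ⟨h.2.1, h.1, pv_adj_symm h.2.2⟩

theorem pv_reach_symm (grid : List (List String)) (t : String) {x y : Int × Int}
    (h : ReachP grid t x y) : ReachP grid t y x := by
  induction h with
  | refl => exact Relation.ReflTransGen.refl
  | tail _ hst ih => exact Relation.ReflTransGen.head (pv_st_symm grid t hst) ih

theorem pv_reach_terr (grid : List (List String)) (t : String) {x y : Int × Int}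
    (hx : TerrP grid t x) (h : ReachP grid t x y) : TerrP grid t y := by
  induction h with
  | refl => exact hx
  | tail _ hst _ => exact hst.2.1

theorem pv_closed_reach (grid : List (List String)) (t : String) (C : List (Int × Int))
    (hC : ∀ u ∈ C, ∀ v, StP grid t u v → v ∈ C) {x y : Int × Int}
    (hx : x ∈ C) (h : ReachP grid t x y) : y ∈ C := by
  induction h with
  | refl => exact hx
  | tail _ hst ih => exact hC _ ih _ hst

-- ---- cardinality bound: a nodup list of in-bounds cells has at most H*W elements ----
theorem pv_card_bound (grid : List (List String)) (l : List (Int × Int))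
    (hn : l.Nodup) (hb : ∀ x ∈ l, pvBnd grid x) : l.length ≤ pvHW grid := by
  classical
  set W := (grid.headD []).length with hW
  set H := grid.length with hH
  -- encode each in-bounds cell injectively into range H*W
  have henc : ∀ x ∈ l, x.1.toNat * W + x.2.toNat < H * W := by
    intro x hx
    obtain ⟨h1, h2, h3, h4⟩ := hb x hx
    have hr1 : x.1.toNat + 1 ≤ H := by omega
    have hc : x.2.toNat < W := by omega
    calc x.1.toNat * W + x.2.toNat < x.1.toNat * W + W := by omega
      _ = (x.1.toNat + 1) * W := by ring
      _ ≤ H * W := Nat.mul_le_mul_right W hr1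
  have hinj : ∀ x ∈ l, ∀ y ∈ l, x.1.toNat * W + x.2.toNat = y.1.toNat * W + y.2.toNat → x = y := by
    intro x hx y hy hxy
    obtain ⟨hx1, hx2, hx3, hx4⟩ := hb x hx
    obtain ⟨hy1, hy2, hy3, hy4⟩ := hb y hy
    have hcx : x.2.toNat < W := by omega
    have hcy : y.2.toNat < W := by omega
    have hxr : x.1.toNat = y.1.toNat := by
      rcases Nat.lt_trichotomy x.1.toNat y.1.toNat with h | h | h
      · exfalso
        have : x.1.toNat * W + x.2.toNat < y.1.toNat * W + y.2.toNat := by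
          calc x.1.toNat * W + x.2.toNat < (x.1.toNat + 1) * W := by nlinarith
            _ ≤ y.1.toNat * W := Nat.mul_le_mul_right W h
            _ ≤ y.1.toNat * W + y.2.toNat := by omega
        exact (Nat.ne_of_lt this) hxy
      · exact h
      · exfalso
        have : y.1.toNat * W + y.2.toNat < x.1.toNat * W + x.2.toNat := by
          calc y.1.toNat * W + y.2.toNat < (y.1.toNat + 1) * W := by nlinarith
            _ ≤ x.1.toNat * W := Nat.mul_le_mul_right W h
            _ ≤ x.1.toNat * W + x.2.toNat := by omega
        exact (Nat.ne_of_lt this) hxy.symm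
    have hc2 : x.2.toNat = y.2.toNat := by
      rw [hxr] at hxy
      exact Nat.add_left_cancel hxy
    have : x.1 = y.1 ∧ x.2 = y.2 := by omega
    exact Prod.ext this.1 this.2
  have hmapnd : (l.map (fun x => x.1.toNat * W + x.2.toNat)).Nodup := by
    refine List.Nodup.map_on ?_ hn
    intro x hx y hy h; exact hinj x hx y hy h
  have hsub : (l.map (fun x => x.1.toNat * W + x.2.toNat)) ⊆ List.range (H * W) := by
    intro v hv
    obtain ⟨x, hx, rfl⟩ := List.mem_map.mp hv
    exact List.mem_range.mpr (henc x hx)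
  have hle := (List.subperm_of_subset hmapnd hsub).length_le
  have hEq : pvHW grid = H * W := by rw [hH, hW]; rfl
  rw [hEq]
  simpa using hle

-- ---- A-side: the dfs stack loop computes the connected component ----
theorem pv_mem_push (grid : List (List String)) (p : Int × Int) (st : List (Int × Int))
    (x : Int × Int) : x ∈ pvPush grid p st ↔ (pvBnd grid x ∧ AdjP p x) ∨ x ∈ st := by
  have aux : ∀ (l : List (Int × Int)) (acc : List (Int × Int)),
      x ∈ l.foldl (fun acc d =>
        if 0 ≤ p.1 + d.1 ∧ p.1 + d.1 < (grid.length : Int) ∧ 0 ≤ p.2 + d.2 ∧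
            p.2 + d.2 < ((grid.headD []).length : Int) then (p.1 + d.1, p.2 + d.2) :: acc
        else acc) acc ↔
      (∃ d ∈ l, pvBnd grid (p.1 + d.1, p.2 + d.2) ∧ x = (p.1 + d.1, p.2 + d.2)) ∨ x ∈ acc := by
    intro l
    induction l with
    | nil => intro acc; simp
    | cons d l ih =>
      intro acc
      by_cases hd : 0 ≤ p.1 + d.1 ∧ p.1 + d.1 < (grid.length : Int) ∧ 0 ≤ p.2 + d.2 ∧
          p.2 + d.2 < ((grid.headD []).length : Int)
      · rw [List.foldl_cons, if_pos hd, ih]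
        constructor
        · rintro (⟨d', hd', hbd', rfl⟩ | hacc)
          · exact Or.inl ⟨d', List.mem_cons_of_mem _ hd', hbd', rfl⟩
          · rcases List.mem_cons.mp hacc with rfl | hacc
            · exact Or.inl ⟨d, List.mem_cons_self .., hd, rfl⟩
            · exact Or.inr hacc
        · rintro (⟨d', hd', hbd', rfl⟩ | hacc)
          · rcases List.mem_cons.mp hd' with rfl | hd'
            · exact Or.inr (List.mem_cons_self ..)
            · exact Or.inl ⟨d', hd', hbd', rfl⟩
          · exact Or.inr (List.mem_cons_of_mem _ hacc)
      · rw [List.foldl_cons, if_neg hd, ih]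
        constructor
        · rintro (⟨d', hd', hbd', rfl⟩ | hacc)
          · exact Or.inl ⟨d', List.mem_cons_of_mem _ hd', hbd', rfl⟩
          · exact Or.inr hacc
        · rintro (⟨d', hd', hbd', rfl⟩ | hacc)
          · rcases List.mem_cons.mp hd' with rfl | hd'
            · exact absurd hbd' hd
            · exact Or.inl ⟨d', hd', hbd', rfl⟩
          · exact Or.inr hacc
  have hpush : x ∈ pvPush grid p st ↔
      (∃ d ∈ pvDirs, pvBnd grid (p.1 + d.1, p.2 + d.2) ∧ x = (p.1 + d.1, p.2 + d.2)) ∨ x ∈ st :=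
    aux pvDirs st
  rw [hpush]
  constructor
  · rintro (⟨d, hd, hbd, rfl⟩ | hst)
    · refine Or.inl ⟨hbd, ?_⟩
      simp only [pvDirs, List.mem_cons, List.not_mem_nil, or_false] at hd
      rcases hd with rfl | rfl | rfl | rfl <;> (simp [AdjP]; try omega)
    · exact Or.inr hst
  · rintro (⟨hb, hadj⟩ | hst)
    · refine Or.inl ?_
      rcases hadj with ⟨h1, h2⟩ | ⟨h1, h2⟩ | ⟨h1, h2⟩ | ⟨h1, h2⟩
      · have hx : x = (p.1 + ((1 : Int), (0 : Int)).1, p.2 + ((1 : Int), (0 : Int)).2) :=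
          Prod.ext (by simpa using h1) (by simpa using h2)
        exact ⟨(1, 0), by simp [pvDirs], by rw [← hx]; exact hb, hx⟩
      · have hx : x = (p.1 + ((-1 : Int), (0 : Int)).1, p.2 + ((-1 : Int), (0 : Int)).2) :=
          Prod.ext (by simp; omega) (by simpa using h2)
        exact ⟨(-1, 0), by simp [pvDirs], by rw [← hx]; exact hb, hx⟩
      · have hx : x = (p.1 + ((0 : Int), (1 : Int)).1, p.2 + ((0 : Int), (1 : Int)).2) :=
          Prod.ext (by simpa using h1) (by simpa using h2)
        exact ⟨(0, 1), by simp [pvDirs], by rw [← hx]; exact hb, hx⟩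
      · have hx : x = (p.1 + ((0 : Int), (-1 : Int)).1, p.2 + ((0 : Int), (-1 : Int)).2) :=
          Prod.ext (by simpa using h1) (by simp; omega)
        exact ⟨(0, -1), by simp [pvDirs], by rw [← hx]; exact hb, hx⟩
    · exact Or.inr hst

theorem pv_push_len (grid : List (List String)) (p : Int × Int) (st : List (Int × Int)) :
    (pvPush grid p st).length ≤ st.length + 4 := by
  simp only [pvPush, pvDirs, List.foldl_cons, List.foldl_nil]
  split_ifs <;> simp <;> omega

theorem pv_dfs_inv (grid : List (List String)) (t : String) (s : Int × Int)
    (hTs : TerrP grid t s) (V : List (Int × Int))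
    (hVT : ∀ x ∈ V, TerrP grid t x)
    (hVc : ∀ u ∈ V, ∀ v, StP grid t u v → v ∈ V) (hsV : s ∉ V) :
    ∀ (fuel : Nat) (stack visited cluster : List (Int × Int)),
    visited = V ++ cluster →
    (V ++ cluster).Nodup →
    (∀ x ∈ cluster, ReachP grid t s x) →
    (∀ x ∈ stack, pvBnd grid x) →
    (∀ x ∈ stack, TerrP grid t x → ReachP grid t s x) →
    (∀ u ∈ cluster, ∀ v, StP grid t u v → v ∈ cluster ∨ v ∈ stack) →
    (s ∈ cluster ∨ s ∈ stack) →
    5 * (pvHW grid - V.length - cluster.length) + stack.length ≤ fuel →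
    (pvDfsLoop grid t fuel stack visited cluster).1 =
      V ++ (pvDfsLoop grid t fuel stack visited cluster).2 ∧
    (V ++ (pvDfsLoop grid t fuel stack visited cluster).2).Nodup ∧
    (∀ x, x ∈ (pvDfsLoop grid t fuel stack visited cluster).2 ↔ ReachP grid t s x) := by
  -- the common terminal argument, used when the stack is empty
  have final : ∀ (visited cluster : List (Int × Int)),
      visited = V ++ cluster → (V ++ cluster).Nodup →
      (∀ x ∈ cluster, ReachP grid t s x) →
      (∀ u ∈ cluster, ∀ v, StP grid t u v → v ∈ cluster) →
      s ∈ cluster →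
      visited = V ++ cluster ∧ (V ++ cluster).Nodup ∧
      (∀ x, x ∈ cluster ↔ ReachP grid t s x) := by
    intro visited cluster h1 h2 h3 hcl hs
    refine ⟨h1, h2, fun x => ⟨h3 x, fun hr => pv_closed_reach grid t cluster hcl hs hr⟩⟩
  intro fuel
  induction fuel with
  | zero =>
    intro stack visited cluster h1 h2 h3 h4 h5 h6 h7 hf
    cases stack with
    | nil =>
      have h6' : ∀ u ∈ cluster, ∀ v, StP grid t u v → v ∈ cluster := by
        intro u hu v hst
        rcases h6 u hu v hst with hv | hv
        · exact hv
        · simp at hv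
      have h7' : s ∈ cluster := by
        rcases h7 with h | h
        · exact h
        · simp at h
      exact final visited cluster h1 h2 h3 h6' h7'
    | cons p rest => simp only [List.length_cons] at hf; omega
  | succ fuel ih =>
    intro stack visited cluster h1 h2 h3 h4 h5 h6 h7 hf
    cases stack with
    | nil =>
      have h6' : ∀ u ∈ cluster, ∀ v, StP grid t u v → v ∈ cluster := by
        intro u hu v hst
        rcases h6 u hu v hst with hv | hv
        · exact hv
        · simp at hv
      have h7' : s ∈ cluster := by
        rcases h7 with h | h
        · exact h
        · simp at h
      exact final visited cluster h1 h2 h3 h6' h7'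
    | cons p rest =>
      have hred : pvDfsLoop grid t (fuel + 1) (p :: rest) visited cluster =
          if PySem.Set.contains visited p = false ∧ pvCell grid p.1 p.2 = t then
            pvDfsLoop grid t fuel (pvPush grid p rest) (PySem.Set.add visited p)
              (cluster ++ [p])
          else pvDfsLoop grid t fuel rest visited cluster := rfl
      rw [hred]
      by_cases hc : PySem.Set.contains visited p = false ∧ pvCell grid p.1 p.2 = t
      · rw [if_pos hc]
        have hpnv : p ∉ visited := (pv_contains_false visited p).mp hc.1
        have hbp : pvBnd grid p := h4 p (List.mem_cons_self ..)
        have hTp : TerrP grid t p := ⟨hbp, hc.2⟩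
        have hRp : ReachP grid t s p := h5 p (List.mem_cons_self ..) hTp
        have hadd : PySem.Set.add visited p = visited ++ [p] :=
          PySem.Set.add_of_not_mem hpnv
        rw [hadd]
        have hpn2 : p ∉ V ++ cluster := by rw [← h1]; exact hpnv
        have hnodup' : (V ++ (cluster ++ [p])).Nodup := by
          have h0 : ((V ++ cluster) ++ [p]).Nodup := by
            rw [List.nodup_append]
            refine ⟨h2, List.nodup_singleton p, ?_⟩
            intro a ha b hb
            rcases List.mem_singleton.mp hb with rfl
            intro heq
            exact hpn2 (heq ▸ ha)
          simpa [List.append_assoc] using h0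
        have hTall : ∀ x ∈ V ++ (cluster ++ [p]), TerrP grid t x := by
          intro x hx
          rcases List.mem_append.mp hx with hx | hx
          · exact hVT x hx
          · rcases List.mem_append.mp hx with hx | hx
            · exact pv_reach_terr grid t hTs (h3 x hx)
            · rcases List.mem_singleton.mp hx with rfl; exact hTp
        have hcard : V.length + cluster.length + 1 ≤ pvHW grid := by
          have hcb := pv_card_bound grid (V ++ (cluster ++ [p])) hnodup'
            (fun x hx => (hTall x hx).1)
          simp only [List.length_append, List.length_cons, List.length_nil] at hcb
          omega
        refine ih (pvPush grid p rest) (visited ++ [p]) (cluster ++ [p]) ?_ hnodup' ?_ ?_ ?_ ?_ ?_ ?_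
        · rw [h1, List.append_assoc]
        · intro x hx
          rcases List.mem_append.mp hx with hx | hx
          · exact h3 x hx
          · rcases List.mem_singleton.mp hx with rfl; exact hRp
        · intro x hx
          rcases (pv_mem_push grid p rest x).mp hx with ⟨hb, _⟩ | hx
          · exact hb
          · exact h4 x (List.mem_cons_of_mem _ hx)
        · intro x hx hTx
          rcases (pv_mem_push grid p rest x).mp hx with ⟨hb, hadj⟩ | hx
          · exact Relation.ReflTransGen.tail hRp ⟨hTp, hTx, hadj⟩
          · exact h5 x (List.mem_cons_of_mem _ hx) hTx
        · intro u hu v hst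
          rcases List.mem_append.mp hu with hu | hu
          · rcases h6 u hu v hst with hv | hv
            · exact Or.inl (List.mem_append.mpr (Or.inl hv))
            · rcases List.mem_cons.mp hv with rfl | hv
              · exact Or.inl (List.mem_append.mpr (Or.inr (List.mem_singleton.mpr rfl)))
              · exact Or.inr ((pv_mem_push grid p rest v).mpr (Or.inr hv))
          · have hup := List.mem_singleton.mp hu
            rw [hup] at hst
            exact Or.inr ((pv_mem_push grid p rest v).mpr (Or.inl ⟨hst.2.1.1, hst.2.2⟩))
        · rcases h7 with h | h
          · exact Or.inl (List.mem_append.mpr (Or.inl h))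
          · rcases List.mem_cons.mp h with rfl | h
            · exact Or.inl (List.mem_append.mpr (Or.inr (List.mem_singleton.mpr rfl)))
            · exact Or.inr ((pv_mem_push grid p rest s).mpr (Or.inr h))
        · have hpl := pv_push_len grid p rest
          simp only [List.length_append, List.length_cons, List.length_nil] at hf ⊢
          omega
      · rw [if_neg hc]
        have hpv_of_terr : pvCell grid p.1 p.2 = t → p ∈ visited := by
          intro hcell
          rcases (not_and_or).mp hc with h | h
          · have hb : PySem.Set.contains visited p = true := by
              simpa using h
            exact (pv_contains_true visited p).mp hb
          · exact absurd hcell h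
        refine ih rest visited cluster h1 h2 h3
          (fun x hx => h4 x (List.mem_cons_of_mem _ hx))
          (fun x hx hT => h5 x (List.mem_cons_of_mem _ hx) hT) ?_ ?_ ?_
        · intro u hu v hst
          rcases h6 u hu v hst with hv | hv
          · exact Or.inl hv
          · rcases List.mem_cons.mp hv with hvp | hv
            · rw [hvp] at hst ⊢
              have hTp : TerrP grid t p := hst.2.1
              have hpv : p ∈ visited := hpv_of_terr hTp.2
              rw [h1] at hpv
              rcases List.mem_append.mp hpv with hpV | hpc
              · exfalso
                have hRu : ReachP grid t s u := h3 u hu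
                have hRsp : ReachP grid t s p := Relation.ReflTransGen.tail hRu hst
                exact hsV (pv_closed_reach grid t V hVc hpV (pv_reach_symm grid t hRsp))
              · exact Or.inl hpc
            · exact Or.inr hv
        · rcases h7 with h | h
          · exact Or.inl h
          · rcases List.mem_cons.mp h with hsp | h
            · have hpv : p ∈ visited := hpv_of_terr (by rw [← hsp]; exact hTs.2)
              rw [h1] at hpv
              rcases List.mem_append.mp hpv with hpV | hpc
              · exact absurd (by rw [hsp]; exact hpV) hsV
              · exact Or.inl (by rw [hsp]; exact hpc)
            · exact Or.inr h
        · simp only [List.length_cons] at hf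
          omega

theorem pv_dfs_run (grid : List (List String)) (t : String) (s : Int × Int)
    (hTs : TerrP grid t s) (V : List (Int × Int))
    (hVT : ∀ x ∈ V, TerrP grid t x) (hVn : V.Nodup)
    (hVc : ∀ u ∈ V, ∀ v, StP grid t u v → v ∈ V) (hsV : s ∉ V) :
    (pvDfsLoop grid t (5 * (grid.length * (grid.headD []).length) + 1) [s] V []).1 =
      V ++ (pvDfsLoop grid t (5 * (grid.length * (grid.headD []).length) + 1) [s] V []).2 ∧
    (V ++ (pvDfsLoop grid t (5 * (grid.length * (grid.headD []).length) + 1) [s] V []).2).Nodup ∧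
    (∀ x, x ∈ (pvDfsLoop grid t (5 * (grid.length * (grid.headD []).length) + 1) [s] V []).2 ↔
      ReachP grid t s x) := by
  have := pv_dfs_inv grid t s hTs V hVT hVc hsV
    (5 * (grid.length * (grid.headD []).length) + 1) [s] V []
    (by simp) (by simpa using hVn) (by simp)
    (fun x hx => by rcases List.mem_singleton.mp hx with rfl; exact hTs.1)
    (fun x hx _ => by rcases List.mem_singleton.mp hx with rfl; exact Relation.ReflTransGen.refl)
    (by simp) (Or.inr (List.mem_singleton.mpr rfl)) ?_
  · exact this
  · simp only [List.length_singleton, List.length_nil, pvHW]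
    omega

-- ---- nested loops over rows and columns = one fold over the row-major cell list ----
theorem pv_foldl_flatMap_map {α β γ : Type} (l1 : List α) (l2 : α → List β)
    (f : γ → α × β → γ) (init : γ) :
    (l1.flatMap (fun a => (l2 a).map (fun b => (a, b)))).foldl f init =
    l1.foldl (fun st a => (l2 a).foldl (fun st b => f st (a, b)) st) init := by
  induction l1 generalizing init with
  | nil => rfl
  | cons a l1 ih =>
    simp only [List.flatMap_cons, List.foldl_append, List.foldl_cons, List.foldl_map, ih]

theorem pv_mem_cellsRM (grid : List (List String)) (x : Int × Int) :
    x ∈ pvCellsRM grid ↔ pvBnd grid x := by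
  constructor
  · intro h
    obtain ⟨r, hr, h2⟩ := List.mem_flatMap.mp h
    obtain ⟨c, hc, heq⟩ := List.mem_map.mp h2
    rw [PySem.List.mem_pyRange_one] at hr hc
    rw [← heq]
    exact ⟨hr.1, hr.2, hc.1, hc.2⟩
  · intro hb
    refine List.mem_flatMap.mpr ⟨x.1, ?_, List.mem_map.mpr ⟨x.2, ?_, ?_⟩⟩
    · exact PySem.List.mem_pyRange_one.mpr ⟨hb.1, hb.2.1⟩
    · exact PySem.List.mem_pyRange_one.mpr ⟨hb.2.2.1, hb.2.2.2⟩
    · exact Prod.mk.eta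

-- ---- A-side outer loop: final clusters are exactly the components of the terrain cells ----
theorem pv_outerA (grid : List (List String)) (t : String) :
    ∀ (cells : List (Int × Int)) (visited : List (Int × Int))
      (clusters : List (List (Int × Int))),
    visited = clusters.flatten →
    visited.Nodup →
    (∀ x ∈ visited, TerrP grid t x) →
    (∀ u ∈ visited, ∀ v, StP grid t u v → v ∈ visited) →
    (∀ cl ∈ clusters, ∃ sd, TerrP grid t sd ∧ ∀ y, (y ∈ cl ↔ ReachP grid t sd y)) →
    (∀ x, TerrP grid t x → x ∈ visited ∨ x ∈ cells) →
    (∀ x ∈ cells, pvBnd grid x) →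
    (∀ cl ∈ (cells.foldl (pvAStep grid t) (visited, clusters)).2,
        ∃ sd, TerrP grid t sd ∧ ∀ y, (y ∈ cl ↔ ReachP grid t sd y)) ∧
    (∀ x, TerrP grid t x → x ∈ (cells.foldl (pvAStep grid t) (visited, clusters)).2.flatten) ∧
    (cells.foldl (pvAStep grid t) (visited, clusters)).2.flatten.Nodup := by
  intro cells
  induction cells with
  | nil =>
    intro visited clusters h1 h2 h3 h4 h5 h6 h7
    simp only [List.foldl_nil]
    refine ⟨h5, ?_, by rw [← h1]; exact h2⟩
    intro x hT
    rcases h6 x hT with hx | hx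
    · rw [h1] at hx; exact hx
    · simp at hx
  | cons p cells ih =>
    intro visited clusters h1 h2 h3 h4 h5 h6 h7
    simp only [List.foldl_cons]
    by_cases hc : PySem.Set.contains visited p = false ∧ pvCell grid p.1 p.2 = t
    · have hstep : pvAStep grid t (visited, clusters) p =
          ((pvDfsLoop grid t (5 * (grid.length * (grid.headD []).length) + 1) [p] visited []).1,
           clusters ++ [(pvDfsLoop grid t (5 * (grid.length * (grid.headD []).length) + 1)
             [p] visited []).2]) := by
        simp only [pvAStep]
        rw [if_pos hc]
      rw [hstep]
      have hTp : TerrP grid t p := ⟨h7 p (List.mem_cons_self ..), hc.2⟩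
      have hpnv : p ∉ visited := (pv_contains_false visited p).mp hc.1
      obtain ⟨hr1, hr2, hr3⟩ := pv_dfs_run grid t p hTp visited h3 h2 h4 hpnv
      set r := pvDfsLoop grid t (5 * (grid.length * (grid.headD []).length) + 1) [p] visited []
        with hrdef
      refine ih r.1 (clusters ++ [r.2]) ?_ ?_ ?_ ?_ ?_ ?_
        (fun x hx => h7 x (List.mem_cons_of_mem _ hx))
      · rw [hr1, h1]
        simp [List.flatten_append]
      · rw [hr1]; exact hr2
      · intro x hx
        rw [hr1] at hx
        rcases List.mem_append.mp hx with hx | hx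
        · exact h3 x hx
        · exact pv_reach_terr grid t hTp ((hr3 x).mp hx)
      · intro u hu v hst
        rw [hr1] at hu ⊢
        rcases List.mem_append.mp hu with hu | hu
        · exact List.mem_append.mpr (Or.inl (h4 u hu v hst))
        · refine List.mem_append.mpr (Or.inr ?_)
          exact (hr3 v).mpr (Relation.ReflTransGen.tail ((hr3 u).mp hu) hst)
      · intro cl hcl
        rcases List.mem_append.mp hcl with hcl | hcl
        · exact h5 cl hcl
        · rcases List.mem_singleton.mp hcl with rfl
          exact ⟨p, hTp, fun y => hr3 y⟩
      · intro x hT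
        rcases h6 x hT with hx | hx
        · rw [hr1]; exact Or.inl (List.mem_append.mpr (Or.inl hx))
        · rcases List.mem_cons.mp hx with rfl | hx
          · rw [hr1]
            exact Or.inl (List.mem_append.mpr (Or.inr ((hr3 x).mpr Relation.ReflTransGen.refl)))
          · exact Or.inr hx
    · have hstep : pvAStep grid t (visited, clusters) p = (visited, clusters) := by
        simp only [pvAStep]
        rw [if_neg hc]
      rw [hstep]
      refine ih visited clusters h1 h2 h3 h4 h5 ?_
        (fun x hx => h7 x (List.mem_cons_of_mem _ hx))
      intro x hT
      rcases h6 x hT with hx | hx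
      · exact Or.inl hx
      · rcases List.mem_cons.mp hx with rfl | hx
        · left
          rcases (not_and_or).mp hc with h | h
          · have hb : PySem.Set.contains visited x = true := by simpa using h
            exact (pv_contains_true visited x).mp hb
          · exact absurd hT.2 h
        · exact Or.inr hx

-- ---- B-side: one BFS round, then the level loop, compute the component ----
def pvRoundFold (grid : List (List String)) (t : String)
    (fr : List (Int × Int)) (s : PySem.Set (Int × Int) × List (Int × Int)) :
    PySem.Set (Int × Int) × List (Int × Int) :=
  fr.foldl (fun st p =>
    (pvNbrs p).foldl (fun (st : PySem.Set (Int × Int) × List (Int × Int)) nb =>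
      if pvTerr grid t nb.1 nb.2 = true ∧ PySem.Set.contains st.1 nb = false then
        (PySem.Set.add st.1 nb, st.2 ++ [nb])
      else st) st) s

theorem pv_round_eq (grid : List (List String)) (t : String)
    (comp : PySem.Set (Int × Int)) (frontier : List (Int × Int)) :
    pvBfsRound grid t comp frontier = pvRoundFold grid t frontier (comp, []) := rfl

theorem pv_nbr_fold (grid : List (List String)) (t : String) (C : List (Int × Int))
    (l : List (Int × Int)) :
    ∀ (s : PySem.Set (Int × Int) × List (Int × Int)),
    s.1 = C ++ s.2 → s.1.Nodup →
    ((l.foldl (fun (st : PySem.Set (Int × Int) × List (Int × Int)) nb =>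
        if pvTerr grid t nb.1 nb.2 = true ∧ PySem.Set.contains st.1 nb = false then
          (PySem.Set.add st.1 nb, st.2 ++ [nb])
        else st) s).1 = C ++ (l.foldl (fun (st : PySem.Set (Int × Int) × List (Int × Int)) nb =>
        if pvTerr grid t nb.1 nb.2 = true ∧ PySem.Set.contains st.1 nb = false then
          (PySem.Set.add st.1 nb, st.2 ++ [nb])
        else st) s).2) ∧
    (l.foldl (fun (st : PySem.Set (Int × Int) × List (Int × Int)) nb =>
        if pvTerr grid t nb.1 nb.2 = true ∧ PySem.Set.contains st.1 nb = false then
          (PySem.Set.add st.1 nb, st.2 ++ [nb])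
        else st) s).1.Nodup ∧
    (∀ x, x ∈ (l.foldl (fun (st : PySem.Set (Int × Int) × List (Int × Int)) nb =>
        if pvTerr grid t nb.1 nb.2 = true ∧ PySem.Set.contains st.1 nb = false then
          (PySem.Set.add st.1 nb, st.2 ++ [nb])
        else st) s).1 ↔ x ∈ s.1 ∨ (TerrP grid t x ∧ x ∈ l)) := by
  induction l with
  | nil =>
    intro s hs hn
    simp only [List.foldl_nil]
    exact ⟨hs, hn, fun x => by simp⟩
  | cons nb rest ih =>
    intro s hs hn
    simp only [List.foldl_cons]
    by_cases hcnd : pvTerr grid t nb.1 nb.2 = true ∧ PySem.Set.contains s.1 nb = false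
    · rw [if_pos hcnd]
      have hnbn : nb ∉ s.1 := (pv_contains_false s.1 nb).mp hcnd.2
      have hTnb : TerrP grid t nb := (pvTerr_iff grid t nb).mp hcnd.1
      have hadd : PySem.Set.add s.1 nb = s.1 ++ [nb] := PySem.Set.add_of_not_mem hnbn
      have hs' : (PySem.Set.add s.1 nb, s.2 ++ [nb]).1 =
          C ++ (PySem.Set.add s.1 nb, s.2 ++ [nb]).2 := by
        show PySem.Set.add s.1 nb = C ++ (s.2 ++ [nb])
        rw [hadd, hs, List.append_assoc]
      have hn' : (PySem.Set.add s.1 nb, s.2 ++ [nb]).1.Nodup := by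
        simp only [hadd]
        rw [List.nodup_append]
        refine ⟨hn, List.nodup_singleton nb, ?_⟩
        intro a ha b hb
        rcases List.mem_singleton.mp hb with rfl
        intro heq
        exact hnbn (heq ▸ ha)
      obtain ⟨hr1, hr2, hr3⟩ := ih (PySem.Set.add s.1 nb, s.2 ++ [nb]) hs' hn'
      refine ⟨hr1, hr2, ?_⟩
      intro x
      rw [hr3 x]
      simp only [hadd]
      constructor
      · rintro (hx | ⟨hT, hx⟩)
        · rcases List.mem_append.mp hx with hx | hx
          · exact Or.inl hx
          · rcases List.mem_singleton.mp hx with rfl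
            exact Or.inr ⟨hTnb, List.mem_cons_self ..⟩
        · exact Or.inr ⟨hT, List.mem_cons_of_mem _ hx⟩
      · rintro (hx | ⟨hT, hx⟩)
        · exact Or.inl (List.mem_append.mpr (Or.inl hx))
        · rcases List.mem_cons.mp hx with rfl | hx
          · exact Or.inl (List.mem_append.mpr (Or.inr (List.mem_singleton.mpr rfl)))
          · exact Or.inr ⟨hT, hx⟩
    · rw [if_neg hcnd]
      obtain ⟨hr1, hr2, hr3⟩ := ih s hs hn
      refine ⟨hr1, hr2, ?_⟩
      intro x
      rw [hr3 x]
      constructor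
      · rintro (hx | ⟨hT, hx⟩)
        · exact Or.inl hx
        · exact Or.inr ⟨hT, List.mem_cons_of_mem _ hx⟩
      · rintro (hx | ⟨hT, hx⟩)
        · exact Or.inl hx
        · rcases List.mem_cons.mp hx with rfl | hx
          · rcases (not_and_or).mp hcnd with h | h
            · exact absurd ((pvTerr_iff grid t x).mpr hT) h
            · have hb : PySem.Set.contains s.1 x = true := by simpa using h
              exact Or.inl ((pv_contains_true s.1 x).mp hb)
          · exact Or.inr ⟨hT, hx⟩

theorem pv_roundFold_inv (grid : List (List String)) (t : String) (comp : List (Int × Int)) :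
    ∀ (fr : List (Int × Int)) (s : PySem.Set (Int × Int) × List (Int × Int)),
    s.1 = comp ++ s.2 → s.1.Nodup →
    (pvRoundFold grid t fr s).1 = comp ++ (pvRoundFold grid t fr s).2 ∧
    (pvRoundFold grid t fr s).1.Nodup ∧
    (∀ x, x ∈ (pvRoundFold grid t fr s).1 ↔
      x ∈ s.1 ∨ (TerrP grid t x ∧ ∃ u ∈ fr, AdjP u x)) := by
  intro fr
  induction fr with
  | nil =>
    intro s hs hn
    simp only [pvRoundFold, List.foldl_nil]
    exact ⟨hs, hn, fun x => by simp⟩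
  | cons p fr ih =>
    intro s hs hn
    have hstep : pvRoundFold grid t (p :: fr) s =
        pvRoundFold grid t fr ((pvNbrs p).foldl
          (fun (st : PySem.Set (Int × Int) × List (Int × Int)) nb =>
            if pvTerr grid t nb.1 nb.2 = true ∧ PySem.Set.contains st.1 nb = false then
              (PySem.Set.add st.1 nb, st.2 ++ [nb])
            else st) s) := rfl
    rw [hstep]
    obtain ⟨hc1, hc2, hc3⟩ := pv_nbr_fold grid t comp (pvNbrs p) s hs hn
    obtain ⟨hr1, hr2, hr3⟩ := ih _ hc1 hc2
    refine ⟨hr1, hr2, ?_⟩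
    intro x
    rw [hr3 x]
    constructor
    · rintro (hx | ⟨hT, u, hu, hadj⟩)
      · rcases (hc3 x).mp hx with hx | ⟨hT, hx⟩
        · exact Or.inl hx
        · exact Or.inr ⟨hT, p, List.mem_cons_self .., (pv_mem_nbrs p x).mp hx⟩
      · exact Or.inr ⟨hT, u, List.mem_cons_of_mem _ hu, hadj⟩
    · rintro (hx | ⟨hT, u, hu, hadj⟩)
      · exact Or.inl ((hc3 x).mpr (Or.inl hx))
      · rcases List.mem_cons.mp hu with rfl | hu
        · exact Or.inl ((hc3 x).mpr (Or.inr ⟨hT, (pv_mem_nbrs u x).mpr hadj⟩))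
        · exact Or.inr ⟨hT, u, hu, hadj⟩

theorem pv_round (grid : List (List String)) (t : String)
    (comp : PySem.Set (Int × Int)) (frontier : List (Int × Int)) (hn : comp.Nodup) :
    (pvBfsRound grid t comp frontier).1 = comp ++ (pvBfsRound grid t comp frontier).2 ∧
    (pvBfsRound grid t comp frontier).1.Nodup ∧
    (∀ x, x ∈ (pvBfsRound grid t comp frontier).1 ↔
      x ∈ comp ∨ (TerrP grid t x ∧ ∃ u ∈ frontier, AdjP u x)) := by
  rw [pv_round_eq]
  exact pv_roundFold_inv grid t comp frontier (comp, []) (by simp) hn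

theorem pv_bfs_nil (grid : List (List String)) (t : String) (fuel : Nat)
    (comp : PySem.Set (Int × Int)) : pvBfsLoop grid t fuel comp [] = comp := by
  cases fuel <;> rfl

theorem pv_bfs_inv (grid : List (List String)) (t : String) (c0 : Int × Int)
    (hT : TerrP grid t c0) :
    ∀ (fuel : Nat) (comp : PySem.Set (Int × Int)) (frontier : List (Int × Int)),
    comp.Nodup →
    (∀ x ∈ frontier, x ∈ comp) →
    c0 ∈ comp →
    (∀ x ∈ comp, ReachP grid t c0 x) →
    (∀ x ∈ comp, TerrP grid t x) →
    (∀ u ∈ comp, u ∉ frontier → ∀ v, StP grid t u v → v ∈ comp) →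
    pvHW grid + 2 ≤ fuel + comp.length →
    (pvBfsLoop grid t fuel comp frontier).Nodup ∧
    (∀ x, x ∈ pvBfsLoop grid t fuel comp frontier ↔ ReachP grid t c0 x) := by
  intro fuel
  induction fuel with
  | zero =>
    intro comp frontier hn hfr hc0 hre hte hcl hf
    exfalso
    have := pv_card_bound grid comp hn (fun x hx => (hte x hx).1)
    omega
  | succ fuel ih =>
    intro comp frontier hn hfr hc0 hre hte hcl hf
    cases frontier with
    | nil =>
      rw [pv_bfs_nil]
      refine ⟨hn, fun x => ⟨hre x, ?_⟩⟩
      intro hr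
      exact pv_closed_reach grid t comp
        (fun u hu v hst => hcl u hu (by simp) v hst) hc0 hr
    | cons f fs =>
      have hred : pvBfsLoop grid t (fuel + 1) comp (f :: fs) =
          pvBfsLoop grid t fuel (pvBfsRound grid t comp (f :: fs)).1
            (pvBfsRound grid t comp (f :: fs)).2 := rfl
      rw [hred]
      obtain ⟨hr1, hr2, hr3⟩ := pv_round grid t comp (f :: fs) hn
      set st := pvBfsRound grid t comp (f :: fs) with hstdef
      have hclosed' : ∀ u ∈ st.1, u ∉ st.2 → ∀ v, StP grid t u v → v ∈ st.1 := by
        intro u hu hunf v hst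
        have hucomp : u ∈ comp := by
          rw [hr1] at hu
          rcases List.mem_append.mp hu with h | h
          · exact h
          · exact absurd h hunf
        by_cases hufr : u ∈ f :: fs
        · exact (hr3 v).mpr (Or.inr ⟨hst.2.1, u, hufr, hst.2.2⟩)
        · exact (hr3 v).mpr (Or.inl (hcl u hucomp hufr v hst))
      have hsub : ∀ x ∈ st.1, x ∈ comp ∨ (TerrP grid t x ∧ ∃ u ∈ f :: fs, AdjP u x) :=
        fun x hx => (hr3 x).mp hx
      have hre' : ∀ x ∈ st.1, ReachP grid t c0 x := by
        intro x hx
        rcases hsub x hx with hx | ⟨hTx, u, hu, hadj⟩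
        · exact hre x hx
        · exact Relation.ReflTransGen.tail (hre u (hfr u hu)) ⟨hte u (hfr u hu), hTx, hadj⟩
      have hte' : ∀ x ∈ st.1, TerrP grid t x := by
        intro x hx
        rcases hsub x hx with hx | ⟨hTx, _⟩
        · exact hte x hx
        · exact hTx
      cases hnxt : st.2 with
      | nil =>
        rw [pv_bfs_nil]
        refine ⟨hr2, fun x => ⟨hre' x, ?_⟩⟩
        intro hr
        refine pv_closed_reach grid t st.1 ?_ (by rw [hr1]; exact List.mem_append.mpr (Or.inl hc0)) hr
        intro u hu v hst
        exact hclosed' u hu (by rw [hnxt]; simp) v hst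
      | cons q qs =>
        rw [← hnxt]
        refine ih st.1 st.2 hr2 (fun x hx => by rw [hr1]; exact List.mem_append.mpr (Or.inr hx))
          (by rw [hr1]; exact List.mem_append.mpr (Or.inl hc0)) hre' hte' hclosed' ?_
        have hlen : st.1.length = comp.length + st.2.length := by
          rw [hr1]; simp
        have hge : st.2.length ≥ 1 := by rw [hnxt]; simp
        omega

theorem pv_bfs_run (grid : List (List String)) (t : String) (c : Int × Int)
    (hT : TerrP grid t c) :
    (pvBfsLoop grid t (grid.length * (grid.headD []).length + 2)
      (PySem.Set.add PySem.Set.empty c) [c]).Nodup ∧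
    (∀ x, x ∈ pvBfsLoop grid t (grid.length * (grid.headD []).length + 2)
      (PySem.Set.add PySem.Set.empty c) [c] ↔ ReachP grid t c x) := by
  have hst : PySem.Set.add PySem.Set.empty c = [c] := by
    have : c ∉ (PySem.Set.empty : PySem.Set (Int × Int)) := by simp [PySem.Set.empty]
    simpa using PySem.Set.add_of_not_mem this
  rw [hst]
  refine pv_bfs_inv grid t c hT (grid.length * (grid.headD []).length + 2) [c] [c]
    (List.nodup_singleton c) (fun x hx => hx) (List.mem_singleton.mpr rfl) ?_ ?_ ?_ ?_
  · intro x hx; rcases List.mem_singleton.mp hx with rfl; exact Relation.ReflTransGen.refl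
  · intro x hx; rcases List.mem_singleton.mp hx with rfl; exact hT
  · intro u hu hnu v hst; exact absurd hu hnu
  · simp only [List.length_singleton, pvHW]
    omega

-- ---- corners ----
theorem pv_mem_corners (grid : List (List String)) (t : String) (x : Int × Int) :
    x ∈ pvCorners grid t ↔ CornerP grid t x := by
  constructor
  · intro h
    obtain ⟨r, hr, h2⟩ := List.mem_flatMap.mp h
    obtain ⟨c, hc, heq⟩ := List.mem_map.mp h2
    obtain ⟨hcr, hb⟩ := List.mem_filter.mp hc
    simp only [Bool.and_eq_true] at hb
    rw [← heq]
    exact ⟨(pvTerr_iff grid t (r, c)).mp hb.1.1.1,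
      (pvTerr_iff grid t (r + 1, c)).mp hb.1.1.2,
      (pvTerr_iff grid t (r, c + 1)).mp hb.1.2,
      (pvTerr_iff grid t (r + 1, c + 1)).mp hb.2⟩
  · intro hcn
    obtain ⟨h1, h2, h3, h4⟩ := hcn
    have hb1 := (pvTerr_iff grid t (x.1, x.2)).mpr (by simpa using h1)
    have hb2 := (pvTerr_iff grid t (x.1 + 1, x.2)).mpr h2
    have hb3 := (pvTerr_iff grid t (x.1, x.2 + 1)).mpr h3
    have hb4 := (pvTerr_iff grid t (x.1 + 1, x.2 + 1)).mpr h4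
    obtain ⟨⟨hr1, hr2, hc1, hc2⟩, _⟩ := h1
    refine List.mem_flatMap.mpr ⟨x.1, ?_, List.mem_map.mpr ⟨x.2, ?_, Prod.mk.eta⟩⟩
    · exact PySem.List.mem_pyRange_one.mpr ⟨hr1, hr2⟩
    · refine List.mem_filter.mpr ⟨PySem.List.mem_pyRange_one.mpr ⟨hc1, hc2⟩, ?_⟩
      simp only [Bool.and_eq_true]
      exact ⟨⟨⟨hb1, hb2⟩, hb3⟩, hb4⟩

-- ---- counting ----
theorem pv_flatten_pairwise {α : Type} (ls : List (List α)) (h : ls.flatten.Nodup) :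
    ls.Pairwise (fun a b => ∀ x, x ∈ a → x ∉ b) := by
  induction ls with
  | nil => exact List.Pairwise.nil
  | cons a ls ih =>
    simp only [List.flatten_cons] at h
    refine List.Pairwise.cons ?_ (ih (List.Nodup.of_append_right h))
    intro b hb x hxa hxb
    exact List.disjoint_of_nodup_append h hxa (List.mem_flatten.mpr ⟨b, hb, hxb⟩)

theorem pv_countP_congr {α : Type} (l : List α) (p q : α → Bool)
    (h : ∀ x ∈ l, p x = q x) : l.countP p = l.countP q := by
  induction l with
  | nil => rfl
  | cons a l ih =>
    simp only [List.countP_cons, h a (List.mem_cons_self ..),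
      ih (fun x hx => h x (List.mem_cons_of_mem _ hx))]

theorem pv_countP_step {α : Type} (c : α) (p q : List α → Bool) (b : Bool) :
    ∀ (cls : List (List α)),
    cls.Pairwise (fun a b => ∀ x, x ∈ a → x ∉ b) →
    (∃ cl ∈ cls, c ∈ cl) →
    (∀ cl ∈ cls, c ∉ cl → p cl = q cl) →
    (∀ cl ∈ cls, c ∈ cl → (p cl = b ∧ q cl = false)) →
    cls.countP p = cls.countP q + (if b then 1 else 0) := by
  intro cls
  induction cls with
  | nil => rintro _ ⟨cl, h, _⟩; simp at h
  | cons a cls ih =>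
    intro hpw hex hne hc
    have hpw' := (List.pairwise_cons.mp hpw).2
    have hpwa := (List.pairwise_cons.mp hpw).1
    by_cases hca : c ∈ a
    · have hpa := (hc a (List.mem_cons_self ..) hca).1
      have hqa := (hc a (List.mem_cons_self ..) hca).2
      have hrest : cls.countP p = cls.countP q := by
        refine pv_countP_congr cls p q ?_
        intro cl hcl
        exact hne cl (List.mem_cons_of_mem _ hcl) (hpwa cl hcl c hca)
      simp only [List.countP_cons, hrest, hpa, hqa]
      cases b <;> simp <;> omega
    · have hpa : p a = q a := hne a (List.mem_cons_self ..) hca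
      have hex' : ∃ cl ∈ cls, c ∈ cl := by
        obtain ⟨cl, hcl, hccl⟩ := hex
        rcases List.mem_cons.mp hcl with rfl | hcl
        · exact absurd hccl hca
        · exact ⟨cl, hcl, hccl⟩
      have := ih hpw' hex' (fun cl hcl => hne cl (List.mem_cons_of_mem _ hcl))
        (fun cl hcl => hc cl (List.mem_cons_of_mem _ hcl))
      simp only [List.countP_cons, this, hpa]
      cases hqa : q a <;> simp <;> omega

theorem pv_fold_count {β : Type} (q : β → Bool) :
    ∀ (l : List β) (a : Int),
    l.foldl (fun acc x => if q x = true then acc + 1 else acc) a = a + l.countP q := by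
  intro l
  induction l with
  | nil => intro a; simp
  | cons x l ih =>
    intro a
    by_cases h : q x = true <;>
      simp [List.foldl_cons, List.countP_cons, h, ih] <;> push_cast <;> ring

theorem pv_mem_contains_iff {α : Type} [BEq α] [LawfulBEq α] (l : List α) (x : α) :
    l.contains x = true ↔ x ∈ l := by
  simp

theorem pv_hit_iff (l cl : List (Int × Int)) :
    pvHit l cl = true ↔ ∃ x ∈ cl, x ∈ l := by
  simp [pvHit]

-- a cluster that is a component has a 2x2 block iff it contains a corner cell
theorem pv_hasCorner_eq_hit (grid : List (List String)) (t : String)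
    (cl : List (Int × Int)) (sd : Int × Int) (hsd : TerrP grid t sd)
    (hcl : ∀ y, y ∈ cl ↔ ReachP grid t sd y) :
    pvHasCorner cl = pvHit (pvCorners grid t) cl := by
  have hreach2 : ∀ x ∈ cl, ∀ y, StP grid t x y → y ∈ cl := by
    intro x hx y hst
    exact (hcl y).mpr (Relation.ReflTransGen.tail ((hcl x).mp hx) hst)
  have hTmem : ∀ x ∈ cl, TerrP grid t x :=
    fun x hx => pv_reach_terr grid t hsd ((hcl x).mp hx)
  rw [Bool.eq_iff_iff]
  simp only [pvHasCorner, pvHit, List.any_eq_true, Bool.and_eq_true, pv_mem_contains_iff]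
  constructor
  · rintro ⟨rc, hrc, ⟨⟨h0, h1⟩, h2⟩, h3⟩
    refine ⟨rc, hrc, ?_⟩
    rw [pv_mem_corners]
    exact ⟨hTmem rc h0, hTmem _ h1, hTmem _ h2, hTmem _ h3⟩
  · rintro ⟨x, hx, hxc⟩
    rw [pv_mem_corners] at hxc
    obtain ⟨hT0, hT1, hT2, hT3⟩ := hxc
    have h1 : (x.1 + 1, x.2) ∈ cl :=
      hreach2 x hx _ ⟨hT0, hT1, Or.inl ⟨rfl, rfl⟩⟩
    have h2 : (x.1, x.2 + 1) ∈ cl :=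
      hreach2 x hx _ ⟨hT0, hT2, Or.inr (Or.inr (Or.inl ⟨rfl, rfl⟩))⟩
    have h3 : (x.1 + 1, x.2 + 1) ∈ cl :=
      hreach2 _ h1 _ ⟨hT1, hT3, Or.inr (Or.inr (Or.inl ⟨rfl, rfl⟩))⟩
    exact ⟨x, hx, ⟨⟨hx, h1⟩, h2⟩, h3⟩

-- ---- B-side outer loop ----
theorem pv_outerB (grid : List (List String)) (t : String)
    (cls : List (List (Int × Int)))
    (hspec : ∀ cl ∈ cls, ∃ sd, TerrP grid t sd ∧ ∀ y, (y ∈ cl ↔ ReachP grid t sd y))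
    (hcover : ∀ x, TerrP grid t x → x ∈ cls.flatten)
    (hnodup : cls.flatten.Nodup) :
    ∀ (rest pre : List (Int × Int)) (seen : PySem.Set (Int × Int)) (count : Int),
    pvCorners grid t = pre ++ rest →
    (∀ x, x ∈ seen ↔ ∃ c' ∈ pre, ReachP grid t c' x) →
    seen.Nodup →
    count = (cls.countP (pvHit pre) : Int) →
    (rest.foldl (pvBStep grid t) (seen, count)).2 =
      (cls.countP (pvHit (pre ++ rest)) : Int) := by
  have hclcl : ∀ cl ∈ cls, ∀ x ∈ cl, ∀ y ∈ cl, ReachP grid t x y := by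
    intro cl hcl x hx y hy
    obtain ⟨sd, hTsd, hmem⟩ := hspec cl hcl
    exact Relation.ReflTransGen.trans (pv_reach_symm grid t ((hmem x).mp hx)) ((hmem y).mp hy)
  intro rest
  induction rest with
  | nil =>
    intro pre seen count hsplit hseen hnd hcount
    simpa using hcount
  | cons c rest ih =>
    intro pre seen count hsplit hseen hnd hcount
    simp only [List.foldl_cons]
    have hcmem : c ∈ pvCorners grid t := by
      rw [hsplit]
      exact List.mem_append.mpr (Or.inr (List.mem_cons_self ..))
    have hCc : CornerP grid t c := (pv_mem_corners grid t c).mp hcmem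
    have hTc : TerrP grid t c := hCc.1
    have hsplit' : pvCorners grid t = (pre ++ [c]) ++ rest := by
      rw [hsplit, List.append_assoc]
      rfl
    by_cases hin : PySem.Set.contains seen c = true
    · have hstep : pvBStep grid t (seen, count) c = (seen, count) := by
        simp only [pvBStep]
        rw [if_pos hin]
      rw [hstep]
      have hcseen : c ∈ seen := (pv_contains_true seen c).mp hin
      obtain ⟨c'', hc'', hrc''⟩ := (hseen c).mp hcseen
      have hseen' : ∀ x, x ∈ seen ↔ ∃ c' ∈ pre ++ [c], ReachP grid t c' x := by
        intro x
        constructor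
        · intro hx
          obtain ⟨c', hc', hr⟩ := (hseen x).mp hx
          exact ⟨c', List.mem_append.mpr (Or.inl hc'), hr⟩
        · rintro ⟨c', hc', hr⟩
          rcases List.mem_append.mp hc' with hc' | hc'
          · exact (hseen x).mpr ⟨c', hc', hr⟩
          · rcases List.mem_singleton.mp hc' with rfl
            exact (hseen x).mpr ⟨c'', hc'', Relation.ReflTransGen.trans hrc'' hr⟩
      have hcount' : count = (cls.countP (pvHit (pre ++ [c])) : Int) := by
        rw [hcount]
        congr 1
        refine (pv_countP_congr cls _ _ ?_).symm
        intro cl hcl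
        rw [Bool.eq_iff_iff, pv_hit_iff, pv_hit_iff]
        constructor
        · rintro ⟨x, hx, hxl⟩
          rcases List.mem_append.mp hxl with hxl | hxl
          · exact ⟨x, hx, hxl⟩
          · rcases List.mem_singleton.mp hxl with rfl
            -- c ∈ cl: then the earlier corner c'' connected to c is also in cl
            have hc''cl : c'' ∈ cl := by
              obtain ⟨sd, hTsd, hmem⟩ := hspec cl hcl
              exact (hmem c'').mpr (Relation.ReflTransGen.trans ((hmem x).mp hx)
                (pv_reach_symm grid t hrc''))
            exact ⟨c'', hc''cl, hc''⟩
        · rintro ⟨x, hx, hxl⟩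
          exact ⟨x, hx, List.mem_append.mpr (Or.inl hxl)⟩
      have hfin := ih (pre ++ [c]) seen count hsplit' hseen' hnd hcount'
      rw [List.append_assoc, List.singleton_append] at hfin
      exact hfin
    · have hcf : PySem.Set.contains seen c = false := by
        cases h : PySem.Set.contains seen c
        · rfl
        · exact absurd h hin
      have hstep : pvBStep grid t (seen, count) c =
          (PySem.Set.union seen (pvBfsLoop grid t (grid.length * (grid.headD []).length + 2)
            (PySem.Set.add PySem.Set.empty c) [c]), count + 1) := by
        simp only [pvBStep]
        rw [if_neg hin]
      rw [hstep]
      obtain ⟨hSn, hSmem⟩ := pv_bfs_run grid t c hTc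
      set S := pvBfsLoop grid t (grid.length * (grid.headD []).length + 2)
        (PySem.Set.add PySem.Set.empty c) [c] with hSdef
      have hcnotseen : c ∉ seen := (pv_contains_false seen c).mp hcf
      have hnopre : ¬∃ c' ∈ pre, ReachP grid t c' c :=
        fun h => hcnotseen ((hseen c).mpr h)
      have hseen' : ∀ x, x ∈ PySem.Set.union seen S ↔
          ∃ c' ∈ pre ++ [c], ReachP grid t c' x := by
        intro x
        rw [PySem.Set.mem_union]
        constructor
        · rintro (hx | hx)
          · obtain ⟨c', hc', hr⟩ := (hseen x).mp hx
            exact ⟨c', List.mem_append.mpr (Or.inl hc'), hr⟩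
          · exact ⟨c, List.mem_append.mpr (Or.inr (List.mem_singleton.mpr rfl)),
              (hSmem x).mp hx⟩
        · rintro ⟨c', hc', hr⟩
          rcases List.mem_append.mp hc' with hc' | hc'
          · exact Or.inl ((hseen x).mpr ⟨c', hc', hr⟩)
          · rcases List.mem_singleton.mp hc' with rfl
            exact Or.inr ((hSmem x).mpr hr)
      have hnd' : (PySem.Set.union seen S).Nodup := PySem.Set.nodup_union seen S hnd
      have hex : ∃ cl ∈ cls, c ∈ cl := by
        have := hcover c hTc
        obtain ⟨cl, hcl, hc⟩ := List.mem_flatten.mp this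
        exact ⟨cl, hcl, hc⟩
      have hne : ∀ cl ∈ cls, c ∉ cl → pvHit (pre ++ [c]) cl = pvHit pre cl := by
        intro cl hcl hce
        rw [Bool.eq_iff_iff, pv_hit_iff, pv_hit_iff]
        constructor
        · rintro ⟨x, hx, hxl⟩
          rcases List.mem_append.mp hxl with hxl | hxl
          · exact ⟨x, hx, hxl⟩
          · rcases List.mem_singleton.mp hxl with rfl
            exact absurd hx hce
        · rintro ⟨x, hx, hxl⟩
          exact ⟨x, hx, List.mem_append.mpr (Or.inl hxl)⟩
      have hceq : ∀ cl ∈ cls, c ∈ cl → (pvHit (pre ++ [c]) cl = true ∧ pvHit pre cl = false) := by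
        intro cl hcl hce
        constructor
        · rw [pv_hit_iff]
          exact ⟨c, hce, List.mem_append.mpr (Or.inr (List.mem_singleton.mpr rfl))⟩
        · by_contra hq
          have hq' : pvHit pre cl = true := by
            cases h : pvHit pre cl
            · exact absurd h hq
            · rfl
          obtain ⟨x, hx, hxl⟩ := (pv_hit_iff pre cl).mp hq'
          exact hnopre ⟨x, hxl, hclcl cl hcl x hx c hce⟩
      have hstepcount := pv_countP_step c (pvHit (pre ++ [c])) (pvHit pre) true cls
        (pv_flatten_pairwise cls hnodup) hex hne hceq
      have hcount' : count + 1 = (cls.countP (pvHit (pre ++ [c])) : Int) := by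
        rw [hcount, hstepcount]
        push_cast
        simp [add_comm]
      have hfin := ih (pre ++ [c]) (PySem.Set.union seen S) (count + 1) hsplit' hseen' hnd' hcount'
      rw [List.append_assoc, List.singleton_append] at hfin
      exact hfin

-- ---- port reshaping ----
theorem pv_A_shape (grid : List (List String)) (t : String) :
    gnomishcolony grid t =
      (((pvCellsRM grid).foldl (pvAStep grid t) (PySem.Set.empty, [])).2.foldl
        (fun acc cl => if pvHasCorner cl = true then acc + 1 else acc) (0 : Int)) * 6 := by
  rw [pvCellsRM, pv_foldl_flatMap_map]
  rfl

theorem pv_B_shape (grid : List (List String)) (t : String) :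
    gnomishcolony_alt grid t =
      ((pvCorners grid t).foldl (pvBStep grid t) (PySem.Set.empty, (0 : Int))).2 * 6 := by
  rfl

-- ===== VERDICT (by name: the statement is the Claim_ definition above) =====
theorem gnomishcolony_spec : Claim_equal_gnomishcolony := by
  intro grid t hdom hpre
  show gnomishcolony grid t = gnomishcolony_alt grid t
  rw [pv_A_shape, pv_B_shape]
  obtain ⟨ha, hb, hc⟩ := pv_outerA grid t (pvCellsRM grid) PySem.Set.empty []
    (by rfl) (by simp [PySem.Set.empty]) (by simp [PySem.Set.empty])
    (by simp [PySem.Set.empty]) (by simp)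
    (fun x hT => Or.inr ((pv_mem_cellsRM grid x).mpr hT.1))
    (fun x hx => (pv_mem_cellsRM grid x).mp hx)
  set cls := ((pvCellsRM grid).foldl (pvAStep grid t) (PySem.Set.empty, [])).2 with hclsdef
  have hAcount : cls.foldl (fun acc cl => if pvHasCorner cl = true then acc + 1 else acc)
      (0 : Int) = (0 : Int) + cls.countP pvHasCorner := pv_fold_count pvHasCorner cls 0
  have hcongr : cls.countP pvHasCorner = cls.countP (pvHit (pvCorners grid t)) := by
    refine pv_countP_congr cls _ _ ?_
    intro cl hcl
    obtain ⟨sd, hTsd, hmem⟩ := ha cl hcl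
    exact pv_hasCorner_eq_hit grid t cl sd hTsd hmem
  have hzero : (cls.countP (pvHit ([] : List (Int × Int))) : Int) = (0 : Int) := by
    rw [pv_countP_congr cls (pvHit []) (fun _ => false) (by intro cl _; simp [pvHit])]
    simp
  have hB := pv_outerB grid t cls ha hb hc (pvCorners grid t) [] PySem.Set.empty 0
    (by simp) (by intro x; simp [PySem.Set.empty]) (by simp [PySem.Set.empty]) hzero.symm
  rw [List.nil_append] at hB
  rw [hAcount, hB, hcongr]
  push_cast
  ring
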